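-- pv_equiv track=rewrite | github.com/ingka-group/asyncapi-payload-validator | tests/test_validator.py | _extract_fail_categories
-- ===== SOURCE A (Python) =====
-- CATEGORY_PATTERNS = [
--     ("Extra Attributes", "Attributes in JSON but not in YAML:"),
--     ("Type Mismatches", "Attributes with type mismatches:"),
--     ("Missing Required", "Required attributes in YAML but missing in JSON:"),
--     ("Length Violations", "Length violations:"),
--     ("Pattern Violations", "Pattern violations:"),
--     ("Enum Violations", "Enum violations:"),
--     ("Numeric Violations", "Numeric violations:"),
--     ("Composition Violations", "Composition (oneOf/anyOf/allOf) violations:"),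
-- ]
--
-- def _extract_fail_categories(stdout: str):
--     lines = stdout.splitlines()
--     fail = []
--     for cat, marker in CATEGORY_PATTERNS:
--         for i,l in enumerate(lines):
--             if marker in l:
--                 # Look ahead until blank line or end for a 'None'
--                 block = []
--                 for j in range(i+1, len(lines)):
--                     if not lines[j].strip():
--                         break
--                     block.append(lines[j])
--                 joined = "\n".join(block)
--                 if 'None' not in joined:
--                     fail.append(cat)
--                 break
--     return fail
-- ===== SOURCE B (Python) =====
-- CATEGORY_PATTERNS = [
--     ("Extra Attributes", "Attributes in JSON but not in YAML:"),
--     ("Type Mismatches", "Attributes with type mismatches:"),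
--     ("Missing Required", "Required attributes in YAML but missing in JSON:"),
--     ("Length Violations", "Length violations:"),
--     ("Pattern Violations", "Pattern violations:"),
--     ("Enum Violations", "Enum violations:"),
--     ("Numeric Violations", "Numeric violations:"),
--     ("Composition Violations", "Composition (oneOf/anyOf/allOf) violations:"),
-- ]
--
-- def _extract_fail_categories(stdout: str):
--     lines = stdout.splitlines()
--     blocks = {}
--     for i, line in enumerate(lines):
--         for _, marker in CATEGORY_PATTERNS:
--             if marker not in blocks and marker in line:
--                 rest = lines[i + 1:]
--                 blank = next((k for k, nxt in enumerate(rest) if not nxt.strip()), len(rest))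
--                 blocks[marker] = "\n".join(rest[:blank])
--     return [cat for cat, marker in CATEGORY_PATTERNS
--             if marker in blocks and 'None' not in blocks[marker]]
-- ===== Notes on version B (the rewrite author's own statement) =====
-- stated objective: alternative
-- what changed: B makes one pass over the lines building a first-occurrence marker-to-block dictionary, then emits categories in a single pattern-ordered lookup pass, instead of A's per-category rescan of all lines with a hand-rolled break-at-blank inner loop.
import Mathlib
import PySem

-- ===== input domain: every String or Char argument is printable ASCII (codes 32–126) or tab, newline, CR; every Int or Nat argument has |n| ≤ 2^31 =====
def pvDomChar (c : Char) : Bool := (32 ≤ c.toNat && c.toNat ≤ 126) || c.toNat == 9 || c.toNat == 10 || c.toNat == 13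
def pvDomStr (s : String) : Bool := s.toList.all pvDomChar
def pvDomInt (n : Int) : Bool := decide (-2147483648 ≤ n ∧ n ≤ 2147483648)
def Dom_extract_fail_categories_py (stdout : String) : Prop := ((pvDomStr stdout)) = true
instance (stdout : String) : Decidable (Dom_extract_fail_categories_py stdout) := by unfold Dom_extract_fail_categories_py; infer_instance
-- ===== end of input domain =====

-- B builds a first-occurrence marker→block dictionary in one pass over the lines, then emits
-- categories in a single pattern-ordered lookup pass (alternative decomposition, same cost class).

-- module-level constant CATEGORY_PATTERNS, shared context of both implementations
def pvPatterns : List (String × String) := [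
  ("Extra Attributes", "Attributes in JSON but not in YAML:"),
  ("Type Mismatches", "Attributes with type mismatches:"),
  ("Missing Required", "Required attributes in YAML but missing in JSON:"),
  ("Length Violations", "Length violations:"),
  ("Pattern Violations", "Pattern violations:"),
  ("Enum Violations", "Enum violations:"),
  ("Numeric Violations", "Numeric violations:"),
  ("Composition Violations", "Composition (oneOf/anyOf/allOf) violations:")]

-- ===== PORT A =====
-- A's inner j-loop: collect following lines until a blank (stripped-empty) line or end
def pvABlock : List String → List String
  | [] => []
  | l :: rest => if PySem.Str.strip l = "" then [] else l :: pvABlock rest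

-- A's inner i-loop with break: joined block of the first line containing the marker
def pvAFind (marker : String) : List String → Option String
  | [] => none
  | l :: rest =>
      if PySem.Str.isIn marker l then some (PySem.Str.join "\n" (pvABlock rest))
      else pvAFind marker rest

def extract_fail_categories_py (stdout : String) : List String :=
  let lines := PySem.Str.splitlines stdout
  pvPatterns.foldl (fun fail p =>
    match pvAFind p.2 lines with
    | some joined => if PySem.Str.isIn "None" joined then fail else fail ++ [p.1]
    | none => fail) []

-- ===== PORT B =====
-- Source B's outer pass: at each line, record the block for every not-yet-seen marker the line contains;
-- recursing on the list, the current tail IS lines[i+1:]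
def pvBStep (l : String) (rest : List String) (t : PySem.Dict String String) : PySem.Dict String String :=
  pvPatterns.foldl (fun t p =>
    if !(t.contains p.2) && PySem.Str.isIn p.2 l then
      t.insert p.2 (PySem.Str.join "\n"
        (rest.take ((rest.findIdx? (fun nxt => PySem.Str.strip nxt = "")).getD rest.length)))
    else t) t

def pvBBuild : List String → PySem.Dict String String → PySem.Dict String String
  | [], table => table
  | l :: rest, table => pvBBuild rest (pvBStep l rest table)

def extract_fail_categories_py_alt (stdout : String) : List String :=
  let lines := PySem.Str.splitlines stdout
  let blocks := pvBBuild lines PySem.Dict.empty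
  pvPatterns.filterMap (fun p =>
    match blocks.get? p.2 with
    | some joined => if PySem.Str.isIn "None" joined then none else some p.1
    | none => none)

-- ===== PRECONDITION & SPEC =====
def Spec_extract_fail_categories_py (stdout : String) (out : List String) : Prop := out = extract_fail_categories_py_alt stdout
instance (stdout : String) (out : List String) : Decidable (Spec_extract_fail_categories_py stdout out) := by unfold Spec_extract_fail_categories_py; infer_instance

-- ===== CLAIM (what is proved, stated in full; the proofs are below) =====
def Claim_equal_extract_fail_categories_py : Prop := ∀ (stdout : String), Dom_extract_fail_categories_py stdout → Spec_extract_fail_categories_py stdout (extract_fail_categories_py stdout)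

-- ===== LEMMAS AND PROOFS =====

-- A's break-at-blank collector is B's take-to-first-blank-index
lemma pvABlock_eq_take (rest : List String) :
    pvABlock rest =
      rest.take ((rest.findIdx? (fun nxt => PySem.Str.strip nxt = "")).getD rest.length) := by
  induction rest with
  | nil => rfl
  | cons l rest ih =>
      by_cases h : PySem.Str.strip l = ""
      · simp [pvABlock, h, List.findIdx?_cons]
      · simp only [pvABlock, if_neg h, List.findIdx?_cons, decide_eq_true_eq, ih]
        cases hf : rest.findIdx? (fun nxt => decide (PySem.Str.strip nxt = "")) <;>
          simp [hf, List.take_succ_cons]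

-- one line's inner fold over the patterns: first occurrence wins, only present markers are added
lemma pvFold_get (ps : List (String × String)) (t : PySem.Dict String String)
    (l : String) (J : String) (m : String) :
    (ps.foldl (fun t p => if !(t.contains p.2) && PySem.Str.isIn p.2 l then t.insert p.2 J else t) t).get? m
      = if m ∈ ps.map Prod.snd ∧ t.get? m = none ∧ PySem.Str.isIn m l = true then some J
        else t.get? m := by
  induction ps generalizing t with
  | nil => simp
  | cons p ps ih =>
      simp only [List.foldl_cons]
      rw [ih]
      simp only [List.map_cons, List.mem_cons]
      by_cases hcond : (!(t.contains p.2) && PySem.Str.isIn p.2 l) = true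
      · obtain ⟨hc, hl⟩ := Bool.and_eq_true .. |>.mp hcond
        have hc' : t.contains p.2 = false := by
          cases h : t.contains p.2
          · rfl
          · rw [h] at hc; exact absurd hc (by decide)
        rw [if_pos hcond]
        by_cases hm : m = p.2
        · rw [hm, PySem.Dict.get?_insert_self]
          have hnone : t.get? p.2 = none :=
            (PySem.Dict.get?_eq_none_iff_contains t p.2).mpr hc'
          rw [if_neg (fun h => by simpa using h.2.1),
            if_pos ⟨Or.inl rfl, hnone, hl⟩]
        · rw [PySem.Dict.get?_insert_of_ne _ _ hm]
          split_ifs with h1 h2 h3 <;> first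
            | rfl
            | (exact absurd ⟨Or.inr h1.1, h1.2⟩ h2)
            | (exact absurd ⟨h3.1.resolve_left hm, h3.2⟩ h1)
      · rw [if_neg hcond]
        split_ifs with h1 h2 h3 <;> first
          | rfl
          | (exact absurd ⟨Or.inr h1.1, h1.2⟩ h2)
          | skip
        rcases h3.1 with hm | hm
        · have hcont : t.contains p.2 = true ∨ PySem.Str.isIn p.2 l = false := by
            cases h : t.contains p.2
            · cases hl : PySem.Str.isIn p.2 l
              · exact Or.inr rfl
              · exact absurd (by rw [h, hl]; rfl) hcond
            · exact Or.inl rfl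
          rcases hcont with h | h
          · have hnone : t.get? p.2 = none := hm ▸ h3.2.1
            rw [(PySem.Dict.get?_eq_none_iff_contains t p.2).mp hnone] at h
            exact absurd h (by decide)
          · have hl : PySem.Str.isIn p.2 l = true := hm ▸ h3.2.2
            rw [hl] at h; exact absurd h (by decide)
        · exact absurd ⟨hm, h3.2⟩ h1

lemma pvBBuild_cons (t : PySem.Dict String String) (l : String) (rest : List String) :
    pvBBuild (l :: rest) t = pvBBuild rest (pvBStep l rest t) := by
  rw [pvBBuild]

-- the table built by B holds, for each marker, exactly A's first-match joined block
lemma pvBBuild_get (lines : List String) (t : PySem.Dict String String) (m : String)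
    (hm : m ∈ pvPatterns.map Prod.snd) :
    (pvBBuild lines t).get? m
      = if t.get? m = none then pvAFind m lines else t.get? m := by
  induction lines generalizing t with
  | nil => cases h : t.get? m <;> simp [pvBBuild, pvAFind, h]
  | cons l rest ih =>
      rw [pvBBuild_cons, ih, pvBStep, pvFold_get]
      simp only [pvAFind]
      cases hg : t.get? m with
      | some v => simp
      | none =>
          cases hi : PySem.Str.isIn m l with
          | true => simp [hm, pvABlock_eq_take]
          | false => simp

-- A's accumulating fold over the patterns equals B's filterMap, given agreeing per-marker results
lemma pvFoldl_eq_filterMap (ps : List (String × String)) (acc : List String)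
    (q : String → Bool) (f g : String → Option String) (h : ∀ p ∈ ps, f p.2 = g p.2) :
    ps.foldl (fun fail p =>
        match f p.2 with
        | some joined => if q joined then fail else fail ++ [p.1]
        | none => fail) acc
      = acc ++ ps.filterMap (fun p =>
          match g p.2 with
          | some joined => if q joined then none else some p.1
          | none => none) := by
  induction ps generalizing acc with
  | nil => simp
  | cons p ps ih =>
      have hp := h p (by simp)
      have htail : ∀ r ∈ ps, f r.2 = g r.2 := fun r hr => h r (by simp [hr])
      simp only [List.foldl_cons, List.filterMap_cons, hp]
      cases hg : g p.2 with
      | none => simpa using ih _ htail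
      | some joined =>
          cases hq : q joined with
          | true => simpa [hq] using ih _ htail
          | false => rw [ih _ htail]; simp [hq]

-- ===== VERDICT (by name: the statement is the Claim_ definition above) =====
theorem extract_fail_categories_py_spec : Claim_equal_extract_fail_categories_py := by
  intro stdout _
  unfold Spec_extract_fail_categories_py extract_fail_categories_py extract_fail_categories_py_alt
  apply Eq.trans (pvFoldl_eq_filterMap pvPatterns []
    (fun joined => PySem.Str.isIn "None" joined)
    (fun m => pvAFind m (PySem.Str.splitlines stdout))
    (fun m => (pvBBuild (PySem.Str.splitlines stdout) PySem.Dict.empty).get? m) ?_)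
  · simp
  · intro p hp
    show pvAFind p.2 (PySem.Str.splitlines stdout)
      = (pvBBuild (PySem.Str.splitlines stdout) PySem.Dict.empty).get? p.2
    rw [pvBBuild_get _ _ _ (List.mem_map_of_mem hp)]
    simp
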